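-- pv_equiv track=rewrite | github.com/GIVEN53/crawler | meeting.py | is_meeting_time
-- ===== SOURCE A (Python) =====
-- meetings = [[0, 16, 0]]
--
-- def is_meeting_time(weekday_num, hour, min):
--     for meeting in meetings:
--         if meeting[2] == 0:
--             if (weekday_num == meeting[0]) and (hour == meeting[1] - 1) and (min == 59):
--                 return True
--         else:
--             if (weekday_num == meeting[0]) and (hour == meeting[1]) and (min == meeting[2] - 1):
--                 return True
--     return False
-- ===== SOURCE B (Python) =====
-- meetings = [[0, 16, 0]]
--
-- # The meetings table is a module constant, so the reminder condition partially
-- # evaluates to a single closed-form comparison: the only trigger instant is one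
-- # minute before the sole meeting, i.e. weekday 0, 15:59. No loop, no table.
-- def is_meeting_time(weekday_num, hour, min):
--     return weekday_num == 0 and hour == 15 and min == 59
-- ===== Notes on version B (the rewrite author's own statement) =====
-- stated objective: simpler
-- what changed: The per-call scan over the constant meetings table with per-meeting minute-normalization branches is partially evaluated away into one closed-form comparison against the single trigger instant (weekday 0, 15:59).
import Mathlib
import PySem

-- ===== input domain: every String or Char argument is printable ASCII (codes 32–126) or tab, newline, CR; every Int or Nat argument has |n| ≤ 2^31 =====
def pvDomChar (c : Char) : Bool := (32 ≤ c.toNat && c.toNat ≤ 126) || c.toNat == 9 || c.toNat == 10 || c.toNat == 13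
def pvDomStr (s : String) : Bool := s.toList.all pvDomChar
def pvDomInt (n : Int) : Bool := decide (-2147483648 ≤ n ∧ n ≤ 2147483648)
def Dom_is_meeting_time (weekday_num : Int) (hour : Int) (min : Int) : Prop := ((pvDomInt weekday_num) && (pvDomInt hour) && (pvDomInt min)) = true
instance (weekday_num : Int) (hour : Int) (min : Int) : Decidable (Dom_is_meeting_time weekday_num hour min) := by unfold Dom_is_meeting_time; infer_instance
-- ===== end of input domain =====

-- B partially evaluates the constant meetings table into one closed-form comparison (weekday 0, 15:59); simpler, equal return values proved.


-- ===== PORT A =====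
def pvMeetings : List (Int × Int × Int) := [(0, 16, 0)]

-- literal loop over `meetings`: first matching meeting returns True, else False
def pvLoopA (weekday_num hour min : Int) : List (Int × Int × Int) → Bool
  | [] => false
  | m :: rest =>
    if m.2.2 == 0 then
      if weekday_num == m.1 && hour == m.2.1 - 1 && min == 59 then true
      else pvLoopA weekday_num hour min rest
    else
      if weekday_num == m.1 && hour == m.2.1 && min == m.2.2 - 1 then true
      else pvLoopA weekday_num hour min rest

def is_meeting_time (weekday_num : Int) (hour : Int) (min : Int) : Bool :=
  pvLoopA weekday_num hour min pvMeetings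

-- ===== PORT B =====
def is_meeting_time_alt (weekday_num : Int) (hour : Int) (min : Int) : Bool :=
  weekday_num == 0 && hour == 15 && min == 59

-- ===== PRECONDITION & SPEC =====
def Spec_is_meeting_time (weekday_num : Int) (hour : Int) (min : Int) (out : Bool) : Prop := out = is_meeting_time_alt weekday_num hour min
instance (weekday_num : Int) (hour : Int) (min : Int) (out : Bool) : Decidable (Spec_is_meeting_time weekday_num hour min out) := by unfold Spec_is_meeting_time; infer_instance

-- ===== CLAIM (what is proved, stated in full; the proofs are below) =====
def Claim_equal_is_meeting_time : Prop := ∀ (weekday_num : Int) (hour : Int) (min : Int), Dom_is_meeting_time weekday_num hour min → Spec_is_meeting_time weekday_num hour min (is_meeting_time weekday_num hour min)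

-- ===== LEMMAS AND PROOFS =====

-- ===== VERDICT (by name: the statement is the Claim_ definition above) =====
theorem is_meeting_time_spec : Claim_equal_is_meeting_time := by
  intro w h m _
  unfold Spec_is_meeting_time is_meeting_time is_meeting_time_alt pvMeetings pvLoopA
  simp [pvLoopA, Lean.Grind.beq_eq_decide_eq]
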